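-- pv_equiv track=rewrite | github.com/eliotte0106/CSC1301 | HW03.py | highestSum
-- ===== SOURCE A (Python) =====
-- def highestSum(stringList):
--     result = []
--     # cnt = 0
--     # for x in stringList:
--     #     for s in x:
--     #         if s.isdigit():
--     #             cnt += 1
--
--     # if cnt == 0:
--     #     x = 0
--     for x in stringList:
--         t = any(map(str.isdigit,x))
--         if not t:
--             x = 0
--
--     for x in stringList:
--         sum = 0
--         for s in x:
--             if s.isdigit():
--                 sum += int(s)
--         result.append(sum)
--
--     return result.index(max(result))
-- ===== SOURCE B (Python) =====
-- def highestSum(stringList):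
--     best = None  # (first index with the best digit-sum, that digit-sum)
--     i = 0
--     for x in stringList:
--         s = sum(int(c) for c in x if c.isdigit())
--         if best is None or s > best[1]:
--             best = (i, s)
--         i += 1
--     if best is None:
--         raise ValueError("highestSum() arg is an empty sequence")
--     return best[0]
-- ===== Notes on version B (the rewrite author's own statement) =====
-- stated objective: simpler
-- what changed: Drops A's dead first loop and the intermediate sums list: B computes each digit-sum in one pass, keeping only the first best (index, sum) pair with a strict > update, instead of building result[] and re-scanning it with max() and .index().
-- outside the precondition, e.g. on highestSum([]): A raises ValueError, B raises ValueError
import Mathlib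
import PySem

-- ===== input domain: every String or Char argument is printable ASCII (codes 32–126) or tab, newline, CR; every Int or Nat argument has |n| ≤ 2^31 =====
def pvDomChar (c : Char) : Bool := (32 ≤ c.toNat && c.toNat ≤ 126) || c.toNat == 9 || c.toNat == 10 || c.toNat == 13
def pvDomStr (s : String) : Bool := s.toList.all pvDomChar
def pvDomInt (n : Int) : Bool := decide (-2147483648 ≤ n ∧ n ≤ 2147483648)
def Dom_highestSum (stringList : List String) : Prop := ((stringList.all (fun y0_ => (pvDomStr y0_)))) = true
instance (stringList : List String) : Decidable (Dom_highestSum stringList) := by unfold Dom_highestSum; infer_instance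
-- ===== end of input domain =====

-- B replaces A's three passes (a dead loop, a sums list, max+.index) by one pass keeping the
-- first best (index, digit-sum) pair; equivalence of return values is proved on nonempty lists.

-- ===== PORT A =====
-- digit-sum of one string: A's inner loop (int(s) is reached only when s.isdigit(), where ofChars? succeeds)
def pvASum (x : String) : Int :=
  x.toList.foldl (fun s c => if PySem.Chars.isdigit c then s + (PySem.Int.ofChars? [c]).getD 0 else s) 0

def highestSum (stringList : List String) : Int :=
  -- first loop of A: rebinds only its own loop variable, no observable effect; ported as a discarded fold
  let _dead := stringList.foldl (fun u x => if !(x.toList.any PySem.Chars.isdigit) then u else u) ()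
  let result := stringList.foldl (fun acc x => acc ++ [pvASum x]) ([] : List Int)
  match PySem.List.max? result (fun y => y) with
  | none => 0  -- max([]) raises ValueError in Python; excluded by Pre_highestSum
  | some m =>
    match PySem.List.index? result m with
    | none => 0  -- unreachable: the max is a member of result
    | some i => (i : Int)

-- ===== PORT B =====
-- same digit-sum, computed by B's comprehension
def pvBSum (x : String) : Int :=
  x.toList.foldl (fun s c => if PySem.Chars.isdigit c then s + (PySem.Int.ofChars? [c]).getD 0 else s) 0

-- one loop step of B: state = (best as Option (index, best sum), running index i), incoming digit-sum s
def pvBStep (st : Option (Int × Int) × Int) (s : Int) : Option (Int × Int) × Int :=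
  match st with
  | (none, i) => (some (i, s), i + 1)
  | (some (bi, bs), i) => if s > bs then (some (i, s), i + 1) else (some (bi, bs), i + 1)

def highestSum_alt (stringList : List String) : Int :=
  let st := stringList.foldl (fun st x => pvBStep st (pvBSum x)) (none, 0)
  match st.1 with
  | none => 0  -- Python B raises ValueError here; excluded by Pre_highestSum
  | some (bi, _) => bi

-- ===== PRECONDITION & SPEC =====
-- Pre_ excludes only the empty list, on which A's max([]) raises ValueError (B raises too).
def Pre_highestSum (stringList : List String) : Prop := stringList ≠ []
instance (stringList : List String) : Decidable (Pre_highestSum stringList) := by unfold Pre_highestSum; infer_instance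
def pvWitness_highestSum : List String := ["a1", "27"]

def Spec_highestSum (stringList : List String) (out : Int) : Prop := out = highestSum_alt stringList
instance (stringList : List String) (out : Int) : Decidable (Spec_highestSum stringList out) := by unfold Spec_highestSum; infer_instance

-- ===== CLAIM (what is proved, stated in full; the proofs are below) =====
def Claim_equal_highestSum : Prop := ∀ (stringList : List String), Dom_highestSum stringList → Pre_highestSum stringList → Spec_highestSum stringList (highestSum stringList)

-- ===== LEMMAS AND PROOFS =====

theorem pv_le_fold_max : ∀ (t : List Int) (a : Int), a ≤ t.foldl max a := by
  intro t
  induction t with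
  | nil => intro a; simp
  | cons b t ih =>
    intro a
    calc a ≤ max a b := le_max_left a b
    _ ≤ t.foldl max (max a b) := ih (max a b)

theorem pv_fold_max_mem (t : List Int) (a : Int) : t.foldl max a ∈ a :: t := by
  have h := PySem.List.max?_id_cons (x := a) (t := t)
  exact PySem.List.max?_mem h

theorem pv_foldl_append_map (f : String → Int) :
    ∀ (xs : List String) (acc : List Int),
      xs.foldl (fun a x => a ++ [f x]) acc = acc ++ xs.map f := by
  intro xs
  induction xs with
  | nil => intro acc; simp
  | cons x xs ih => intro acc; simp [List.foldl, ih]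

-- B's loop invariant: from state (some (bi, bs), i), the fold over t ends with best sum
-- t.foldl max bs and best index bi (no strict improvement) or i + first index of the new max in t.
theorem pv_bstep_invariant :
    ∀ (t : List Int) (bi bs i : Int),
      t.foldl pvBStep (some (bi, bs), i) =
        (some (if t.foldl max bs > bs
                 then i + ((PySem.List.index? t (t.foldl max bs)).getD 0 : Int)
                 else bi,
               t.foldl max bs),
         i + (t.length : Int)) := by
  intro t
  induction t with
  | nil => intro bi bs i; simp
  | cons a t ih =>
    intro bi bs i
    by_cases ha : a > bs
    · have hmax : max bs a = a := by omega
      simp only [List.foldl, pvBStep, if_pos ha, hmax, ih]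
      have hM : a ≤ t.foldl max a := pv_le_fold_max t a
      simp only [Prod.mk.injEq, Option.some.injEq]
      refine ⟨⟨?_, trivial⟩, by push_cast [List.length_cons]; omega⟩
      by_cases hMa : t.foldl max a > a
      · have hane : a ≠ t.foldl max a := by omega
        have hmemt : t.foldl max a ∈ t := by
          rcases List.mem_cons.1 (pv_fold_max_mem t a) with h | h
          · omega
          · exact h
        obtain ⟨k, hk⟩ := Option.isSome_iff_exists.1
          ((PySem.List.index?_isSome_iff t (t.foldl max a)).2 hmemt)
        rw [if_pos hMa, if_pos (by omega : t.foldl max a > bs),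
            PySem.List.index?_cons_of_ne t hane, hk]
        simp only [Option.map_some, Option.getD_some]
        push_cast; omega
      · have heq : t.foldl max a = a := by omega
        rw [if_neg hMa, if_pos (by omega : t.foldl max a > bs), heq,
            PySem.List.index?_cons_self]
        simp
    · have hmax : max bs a = bs := by omega
      simp only [List.foldl, pvBStep, if_neg ha, hmax, ih]
      simp only [Prod.mk.injEq, Option.some.injEq]
      refine ⟨⟨?_, trivial⟩, by push_cast [List.length_cons]; omega⟩
      by_cases hMb : t.foldl max bs > bs
      · have hane : a ≠ t.foldl max bs := by omega
        have hmemb : t.foldl max bs ∈ t := by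
          rcases List.mem_cons.1 (pv_fold_max_mem t bs) with h | h
          · omega
          · exact h
        obtain ⟨k, hk⟩ := Option.isSome_iff_exists.1
          ((PySem.List.index?_isSome_iff t (t.foldl max bs)).2 hmemb)
        rw [if_pos hMb, if_pos hMb, PySem.List.index?_cons_of_ne t hane, hk]
        simp only [Option.map_some, Option.getD_some]
        push_cast; omega
      · rw [if_neg hMb, if_neg hMb]

-- on a nonempty list of digit-sums, A's max+index equals B's single-pass fold
theorem pv_core (a : Int) (t : List Int) :
    (match PySem.List.max? (a :: t) (fun y => y) with
     | none => (0 : Int)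
     | some m =>
       match PySem.List.index? (a :: t) m with
       | none => (0 : Int)
       | some i => (i : Int)) =
    (match ((a :: t).foldl pvBStep ((none : Option (Int × Int)), 0)).1 with
     | none => (0 : Int)
     | some (bi, _) => bi) := by
  have hstep : (a :: t).foldl pvBStep ((none : Option (Int × Int)), 0) =
      t.foldl pvBStep (some ((0 : Int), a), 1) := by
    simp [List.foldl, pvBStep]
  rw [hstep, pv_bstep_invariant, PySem.List.max?_id_cons]
  have hM : a ≤ t.foldl max a := pv_le_fold_max t a
  by_cases hMa : t.foldl max a > a
  · have hane : a ≠ t.foldl max a := by omega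
    have hmemt : t.foldl max a ∈ t := by
      rcases List.mem_cons.1 (pv_fold_max_mem t a) with h | h
      · omega
      · exact h
    obtain ⟨k, hk⟩ := Option.isSome_iff_exists.1
      ((PySem.List.index?_isSome_iff t (t.foldl max a)).2 hmemt)
    have hcons : PySem.List.index? (a :: t) (t.foldl max a) = some (k + 1) := by
      rw [PySem.List.index?_cons_of_ne t hane, hk]; rfl
    show (match PySem.List.index? (a :: t) (t.foldl max a) with
          | none => (0 : Int) | some i => (i : Int)) =
         (if t.foldl max a > a then 1 + ((PySem.List.index? t (t.foldl max a)).getD 0 : Int) else 0)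
    rw [hcons, if_pos hMa, hk]
    show ((k + 1 : Nat) : Int) = 1 + ((k : Nat) : Int)
    push_cast; omega
  · have heq : t.foldl max a = a := by omega
    rw [heq]
    show (match PySem.List.index? (a :: t) a with
          | none => (0 : Int) | some i => (i : Int)) =
         (if a > a then 1 + ((PySem.List.index? t a).getD 0 : Int) else 0)
    rw [PySem.List.index?_cons_self, if_neg (lt_irrefl a)]
    rfl

-- ===== VERDICT (by name: the statement is the Claim_ definition above) =====
theorem highestSum_spec : Claim_equal_highestSum := by
  intro stringList _hdom hpre
  unfold Spec_highestSum highestSum highestSum_alt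
  simp only [pv_foldl_append_map, List.nil_append]
  have hfold : stringList.foldl (fun st x => pvBStep st (pvBSum x))
      ((none : Option (Int × Int)), 0) =
      (stringList.map pvASum).foldl pvBStep ((none : Option (Int × Int)), 0) := by
    rw [List.foldl_map]; rfl
  rw [hfold]
  cases stringList with
  | nil => exact absurd rfl hpre
  | cons x xs =>
    simp only [List.map]
    exact pv_core (pvASum x) (xs.map pvASum)
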